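-- pv_equiv track=rewrite | github.com/Mertvy/AdventOfCode2024 | day10.py | part1
-- ===== SOURCE A (Python) =====
-- def trail_DFS(t_map, x, y, visit=False, visited=None):
--     if visit:
--         visited[y][x] = True
--     height = t_map[y][x]
--     if height == 9:
--         return 1
--     score = 0
--     if y > 0 and t_map[y - 1][x] == height + 1 and (not visit or not visited[y - 1][x]):
--         score += trail_DFS(t_map, x, y - 1, visit=visit, visited=visited)
--     if x > 0 and t_map[y][x - 1] == height + 1 and (not visit or not visited[y][x - 1]):
--         score += trail_DFS(t_map, x - 1, y, visit=visit, visited=visited)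
--     if y < len(t_map) - 1 and t_map[y + 1][x] == height + 1 and (not visit or not visited[y + 1][x]):
--         score += trail_DFS(t_map, x, y + 1, visit=visit, visited=visited)
--     if x < len(t_map[y]) - 1 and t_map[y][x + 1] == height + 1 and (not visit or not visited[y][x + 1]):
--         score += trail_DFS(t_map, x + 1, y, visit=visit, visited=visited)
--     return score
--
-- def part1(t_map):
--     total = 0
--     for y in range(len(t_map)):
--         for x in range(len(t_map[0])):
--             if t_map[y][x] == 0:
--                 visited = [[False for x in row] for row in t_map]
--                 total += trail_DFS(t_map, x, y, visit=True, visited=visited)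
--     return total
-- ===== SOURCE B (Python) =====
-- def part1(t_map):
--     # Level-set expansion: per trailhead, grow the set of reachable cells
--     # height by height (1..9) with set comprehensions; no recursion, no
--     # visited matrix.  total = sum of |level-9 set| over trailheads.
--     rows = len(t_map)
--     total = 0
--     for y, row in enumerate(t_map):
--         for x, v in enumerate(row):
--             if v == 0:
--                 cells = {(y, x)}
--                 for h in range(1, 10):
--                     nxt = set()
--                     for (cy, cx) in cells:
--                         if cy > 0 and cx < len(t_map[cy - 1]) and t_map[cy - 1][cx] == h:
--                             nxt.add((cy - 1, cx))
--                         if cy + 1 < rows and cx < len(t_map[cy + 1]) and t_map[cy + 1][cx] == h: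
--                             nxt.add((cy + 1, cx))
--                         if cx > 0 and t_map[cy][cx - 1] == h:
--                             nxt.add((cy, cx - 1))
--                         if cx + 1 < len(t_map[cy]) and t_map[cy][cx + 1] == h:
--                             nxt.add((cy, cx + 1))
--                     cells = nxt
--                 total += len(cells)
--     return total
-- ===== Notes on version B (the rewrite author's own statement) =====
-- stated objective: faster
-- what changed: Replaces the recursive DFS that allocates a fresh full visited matrix per trailhead by an iterative level-set (BFS-by-height) expansion: per trailhead the set of reachable cells is grown once for each height 1..9 with set operations, touching only reachable cells, and the score is the size of the final height-9 set.
-- outside the precondition, e.g. on part1([[0, 0], [1]]): A raises IndexError, B returns 0; on part1([[5], [9, 8, 7, 6, 5, 4, 3, 2, 1, 0]]): A returns 0, B returns 1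
import Mathlib
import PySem

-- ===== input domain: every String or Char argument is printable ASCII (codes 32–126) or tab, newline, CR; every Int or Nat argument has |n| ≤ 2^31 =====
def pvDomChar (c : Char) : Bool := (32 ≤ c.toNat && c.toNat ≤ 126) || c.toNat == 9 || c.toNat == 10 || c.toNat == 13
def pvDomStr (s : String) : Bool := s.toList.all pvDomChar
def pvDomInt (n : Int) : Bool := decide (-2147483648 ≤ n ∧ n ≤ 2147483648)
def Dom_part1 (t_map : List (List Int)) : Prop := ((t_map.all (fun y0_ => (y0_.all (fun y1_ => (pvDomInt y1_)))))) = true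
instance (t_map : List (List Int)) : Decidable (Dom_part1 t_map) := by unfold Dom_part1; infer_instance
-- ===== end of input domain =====

-- B replaces A's recursive DFS (which allocates a fresh full visited matrix per trailhead)
-- by an iterative level-set expansion touching only reachable cells (the set of reachable
-- cells is grown once per height 1..9); objective: faster (measured);
-- equal return value proved on Pre_part1.

-- ===== PORT A =====
-- grid / visited-matrix access helpers; under Pre_part1 every index A uses is in range,
-- so the getD defaults are never read on admitted inputs
def gH (t : List (List Int)) (y x : Nat) : Int := (t.getD y []).getD x 0
def gV (v : List (List Bool)) (y x : Nat) : Bool := (v.getD y []).getD x true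
def setV (v : List (List Bool)) (y x : Nat) : List (List Bool) := v.set y ((v.getD y []).set x true)

-- trail_DFS ported at its call pattern in part1 (visit=True, visited a matrix, so the
-- 'not visit or' disjuncts are dropped); the mutated visited matrix is threaded as state.
-- The fuel makes the recursion structural; part1 supplies fuel > number of cells, proved
-- below never to be exhausted (each call permanently marks an unvisited cell).
def trailDFS (fuel : Nat) (t : List (List Int)) (x y : Nat) (v : List (List Bool)) :
    Int × List (List Bool) :=
  match fuel with
  | 0 => (0, v)
  | Nat.succ f =>
    let v0 := setV v y x
    let h := gH t y x
    if h = 9 then (1, v0)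
    else
      let acc0 : Int × List (List Bool) := (0, v0)
      let acc1 := if 0 < y ∧ gH t (y-1) x = h + 1 ∧ gV acc0.2 (y-1) x = false then
                    let r := trailDFS f t x (y-1) acc0.2; (acc0.1 + r.1, r.2) else acc0
      let acc2 := if 0 < x ∧ gH t y (x-1) = h + 1 ∧ gV acc1.2 y (x-1) = false then
                    let r := trailDFS f t (x-1) y acc1.2; (acc1.1 + r.1, r.2) else acc1
      let acc3 := if y + 1 < t.length ∧ gH t (y+1) x = h + 1 ∧ gV acc2.2 (y+1) x = false then
                    let r := trailDFS f t x (y+1) acc2.2; (acc2.1 + r.1, r.2) else acc2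
      let acc4 := if x + 1 < (t.getD y []).length ∧ gH t y (x+1) = h + 1 ∧ gV acc3.2 y (x+1) = false then
                    let r := trailDFS f t (x+1) y acc3.2; (acc3.1 + r.1, r.2) else acc3
      acc4


-- visited = [[False for x in row] for row in t_map]
def mkVis (t : List (List Int)) : List (List Bool) := t.map (fun row => row.map (fun _ => false))

def part1 (t_map : List (List Int)) : Int :=
  (List.range t_map.length).foldl (fun total y =>
    (List.range (t_map.headD []).length).foldl (fun total x =>
      if gH t_map y x = 0 then
        total + (trailDFS ((t_map.map List.length).sum + 1) t_map x y (mkVis t_map)).1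
      else total) total) 0


-- ===== PORT B =====
-- one expansion round: the next level set (all cells of height h adjacent to the current set)
def bStep (t : List (List Int)) (rows : Nat) (h : Int) (cells : List (Nat × Nat)) :
    PySem.Set (Nat × Nat) :=
  cells.foldl (fun nxt c =>
    let nxt := if 0 < c.1 ∧ c.2 < (t.getD (c.1-1) []).length ∧ gH t (c.1-1) c.2 = h then
                 PySem.Set.add nxt (c.1-1, c.2) else nxt
    let nxt := if c.1 + 1 < rows ∧ c.2 < (t.getD (c.1+1) []).length ∧ gH t (c.1+1) c.2 = h then
                 PySem.Set.add nxt (c.1+1, c.2) else nxt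
    let nxt := if 0 < c.2 ∧ gH t c.1 (c.2-1) = h then
                 PySem.Set.add nxt (c.1, c.2-1) else nxt
    let nxt := if c.2 + 1 < (t.getD c.1 []).length ∧ gH t c.1 (c.2+1) = h then
                 PySem.Set.add nxt (c.1, c.2+1) else nxt
    nxt) PySem.Set.empty


-- score of one trailhead: |level-9 set|
def bScore (t : List (List Int)) (y x : Nat) : Int :=
  let cells := (PySem.List.pyRange 1 10 1).foldl
    (fun cells h => (bStep t t.length h cells : List (Nat × Nat)))
    (PySem.Set.add PySem.Set.empty (y, x))
  (cells.length : Int)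


-- the two enumerate loops of Source B
def bColLoop (t : List (List Int)) (y x : Nat) (row : List Int) (total : Int) : Int :=
  match row with
  | [] => total
  | v :: vs => bColLoop t y (x+1) vs (if v = 0 then total + bScore t y x else total)

def bRowLoop (t : List (List Int)) (y : Nat) (rs : List (List Int)) (total : Int) : Int :=
  match rs with
  | [] => total
  | r :: rs => bRowLoop t (y+1) rs (bColLoop t y 0 r total)

def part1_alt (t_map : List (List Int)) : Int := bRowLoop t_map 0 t_map 0

-- ===== PRECONDITION & SPEC =====
-- Pre_part1 admits rectangular grids, and ragged grids that are trivially scored (no row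
-- shorter than row 0 and no 0-cell, so both programs return 0).  Other ragged grids are
-- excluded: A scans every row over the column range of row 0 and indexes neighbour rows
-- without per-row bounds checks, so there it raises IndexError or, where it happens to
-- return, the set of cells it scans is an accident of row 0's length (cites in the claim).
def Pre_part1 (t_map : List (List Int)) : Prop :=
  (∀ row ∈ t_map, row.length = (t_map.headD []).length) ∨
  ((∀ row ∈ t_map, (t_map.headD []).length ≤ row.length) ∧
    (∀ row ∈ t_map, ∀ v ∈ row, v ≠ 0))
instance (t_map : List (List Int)) : Decidable (Pre_part1 t_map) := by
  unfold Pre_part1; infer_instance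

def pvWitness_part1 : List (List Int) := [[0, 1], [3, 9]]

def Spec_part1 (t_map : List (List Int)) (out : Int) : Prop := out = part1_alt t_map
instance (t_map : List (List Int)) (out : Int) : Decidable (Spec_part1 t_map out) := by
  unfold Spec_part1; infer_instance

-- ===== CLAIM (what is proved, stated in full; the proofs are below) =====
def Claim_equal_part1 : Prop :=
  ∀ (t_map : List (List Int)), Dom_part1 t_map → Pre_part1 t_map →
    Spec_part1 t_map (part1 t_map)

-- ===== LEMMAS AND PROOFS =====
def Rect (t : List (List Int)) : Prop := ∀ row ∈ t, row.length = (t.headD []).length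

theorem getD_default {α} {l : List α} {n : Nat} {d : α} (h : l.length ≤ n) : l.getD n d = d := by
  rw [List.getD_eq_getElem?_getD, List.getElem?_eq_none h]; rfl

theorem getD_set_self {α} {l : List α} {n : Nat} {a d : α} (h : n < l.length) :
    (l.set n a).getD n d = a := by
  rw [List.getD_eq_getElem?_getD, List.getElem?_set_self h]; rfl

theorem getD_set_ne {α} {l : List α} {n m : Nat} {a d : α} (h : n ≠ m) :
    (l.set n a).getD m d = l.getD m d := by
  rw [List.getD_eq_getElem?_getD, List.getElem?_set_ne h, ← List.getD_eq_getElem?_getD]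

theorem setV_row (v : List (List Bool)) (y x y' : Nat) :
    (setV v y x).getD y' [] =
      if y = y' ∧ y < v.length then (v.getD y []).set x true else v.getD y' [] := by
  unfold setV
  by_cases hy : y = y'
  · subst hy
    by_cases hyl : y < v.length
    · rw [getD_set_self hyl, if_pos ⟨rfl, hyl⟩]
    · rw [if_neg (fun h => hyl h.2), List.set_eq_of_length_le (by omega)]
  · rw [getD_set_ne hy, if_neg (fun h => hy h.1)]

theorem gV_false_lt {v : List (List Bool)} {y x : Nat} (h : gV v y x = false) :
    y < v.length ∧ x < (v.getD y []).length := by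
  unfold gV at h
  have hx : x < (v.getD y []).length := by
    by_contra hc
    rw [getD_default (by omega)] at h; simp at h
  have hy : y < v.length := by
    by_contra hc
    rw [getD_default (l := v) (by omega)] at hx; simp at hx
  exact ⟨hy, hx⟩

theorem gV_setV_self {v : List (List Bool)} {y x : Nat}
    (hy : y < v.length) (hx : x < (v.getD y []).length) :
    gV (setV v y x) y x = true := by
  unfold gV
  rw [setV_row, if_pos ⟨rfl, hy⟩, getD_set_self hx]

theorem gV_setV_ne {v : List (List Bool)} {y x y' x' : Nat} (h : ¬(y' = y ∧ x' = x)) :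
    gV (setV v y x) y' x' = gV v y' x' := by
  unfold gV
  rw [setV_row]
  by_cases hy : y = y' ∧ y < v.length
  · obtain ⟨hy1, hy2⟩ := hy
    subst hy1
    have hx : x ≠ x' := fun he => h ⟨rfl, he.symm⟩
    rw [if_pos ⟨rfl, hy2⟩, getD_set_ne hx]
  · rw [if_neg hy]

theorem gV_setV_mono {v : List (List Bool)} {y x a b : Nat} (h : gV v a b = true) :
    gV (setV v y x) a b = true := by
  by_cases hab : a = y ∧ b = x
  · obtain ⟨h1, h2⟩ := hab; subst h1; subst h2
    unfold gV
    rw [setV_row]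
    by_cases hyl : a < v.length
    · rw [if_pos ⟨rfl, hyl⟩]
      by_cases hxl : b < (v.getD a []).length
      · rw [getD_set_self hxl]
      · rw [getD_default (by rw [List.length_set]; omega)]
    · rw [if_neg (fun hh => hyl hh.2)]; exact h
  · rw [gV_setV_ne hab]; exact h

theorem gV_setV_cases {v : List (List Bool)} {y x a b : Nat}
    (h : gV (setV v y x) a b = true) : gV v a b = true ∨ (a = y ∧ b = x) := by
  by_cases hab : a = y ∧ b = x
  · exact Or.inr hab
  · rw [gV_setV_ne hab] at h; exact Or.inl h

def inB (t : List (List Int)) (p : Nat × Nat) : Prop :=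
  p.1 < t.length ∧ p.2 < (t.getD p.1 []).length
def Shape (v : List (List Bool)) (t : List (List Int)) : Prop :=
  v.length = t.length ∧ ∀ y, (v.getD y []).length = (t.getD y []).length
def countF (v : List (List Bool)) : Nat :=
  ∑ i ∈ Finset.range v.length, ((v.getD i []).count false)
def count9 (t : List (List Int)) (v : List (List Bool)) : Nat :=
  (((Finset.range t.length) ×ˢ (Finset.range ((t.headD []).length))).filter
    (fun p => gV v p.1 p.2 = true ∧ gH t p.1 p.2 = 9)).card

theorem shape_setV {v t} (hs : Shape v t) (y x : Nat) : Shape (setV v y x) t := by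
  obtain ⟨h1, h2⟩ := hs
  refine ⟨by rw [← h1]; exact List.length_set, fun y' => ?_⟩
  rw [setV_row]
  by_cases hy : y = y' ∧ y < v.length
  · rw [if_pos hy, List.length_set, ← hy.1]; exact h2 y
  · rw [if_neg hy]; exact h2 y'

theorem gV_false_inB {t v} (hs : Shape v t) {y x : Nat} (h : gV v y x = false) :
    inB t (y, x) := by
  obtain ⟨hy, hx⟩ := gV_false_lt h
  exact ⟨hs.1 ▸ hy, hs.2 y ▸ hx⟩

theorem rowlen_C {t : List (List Int)} (hPre : Rect t) {y : Nat} (hy : y < t.length) :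
    (t.getD y []).length = (t.headD []).length := by
  apply hPre
  rw [List.getD_eq_getElem?_getD, List.getElem?_eq_getElem hy]
  exact List.getElem_mem hy

theorem countF_setV_lt {v : List (List Bool)} {y x : Nat} (h : gV v y x = false) :
    countF (setV v y x) < countF v := by
  obtain ⟨hy, hx⟩ := gV_false_lt h
  unfold countF
  rw [show (setV v y x).length = v.length from List.length_set]
  apply Finset.sum_lt_sum (hlt := ⟨y, Finset.mem_range.mpr hy, ?_⟩)
  · intro i _
    rw [setV_row]
    by_cases hi : y = i ∧ y < v.length
    · obtain ⟨hi1, _⟩ := hi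
      subst hi1
      rw [if_pos ⟨rfl, hy⟩, List.count_set hx]
      have hfx : ((v.getD y [])[x] == false) = true := by
        rw [beq_iff_eq, ← List.getD_eq_getElem _ true hx]; exact h
      rw [hfx, if_pos rfl, if_neg (by decide)]
      omega
    · rw [if_neg hi]
  · rw [setV_row, if_pos ⟨rfl, hy⟩, List.count_set hx]
    have hfx0 : (v.getD y [])[x] = false := by
      rw [← List.getD_eq_getElem _ true hx]; exact h
    have hfx : ((v.getD y [])[x] == false) = true := by rw [beq_iff_eq]; exact hfx0
    have hpos : 0 < (v.getD y []).count false :=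
      List.count_pos_iff.mpr (by rw [← hfx0]; exact List.getElem_mem hx)
    rw [hfx, if_pos rfl, if_neg (by decide)]
    omega

theorem count9_setV {t v} (hPre : Rect t) (hs : Shape v t) {y x : Nat}
    (h : gV v y x = false) :
    count9 t (setV v y x) = count9 t v + (if gH t y x = 9 then 1 else 0) := by
  have hin : inB t (y, x) := gV_false_inB hs h
  have hyv : y < v.length := (gV_false_lt h).1
  have hxv : x < (v.getD y []).length := (gV_false_lt h).2
  have hmemF : (y, x) ∈ (Finset.range t.length) ×ˢ (Finset.range ((t.headD []).length)) := by
    rw [Finset.mem_product, Finset.mem_range, Finset.mem_range]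
    exact ⟨hin.1, (rowlen_C hPre hin.1) ▸ hin.2⟩
  unfold count9
  by_cases h9 : gH t y x = 9
  · rw [if_pos h9]
    have hset : ((Finset.range t.length) ×ˢ (Finset.range ((t.headD []).length))).filter
        (fun p => gV (setV v y x) p.1 p.2 = true ∧ gH t p.1 p.2 = 9) =
        insert (y, x) (((Finset.range t.length) ×ˢ (Finset.range ((t.headD []).length))).filter
        (fun p => gV v p.1 p.2 = true ∧ gH t p.1 p.2 = 9)) := by
      ext p
      simp only [Finset.mem_insert, Finset.mem_filter]
      constructor
      · rintro ⟨hpF, hgv, hg9⟩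
        rcases gV_setV_cases hgv with hold | ⟨h1, h2⟩
        · exact Or.inr ⟨hpF, hold, hg9⟩
        · left; exact Prod.ext h1 h2
      · rintro (rfl | ⟨hpF, hgv, hg9⟩)
        · exact ⟨hmemF, gV_setV_self hyv hxv, h9⟩
        · exact ⟨hpF, gV_setV_mono hgv, hg9⟩
    rw [hset, Finset.card_insert_of_notMem]
    intro hmem
    rw [Finset.mem_filter] at hmem
    rw [hmem.2.1] at h; exact Bool.noConfusion h
  · rw [if_neg h9, Nat.add_zero]
    congr 1
    apply Finset.filter_congr
    intro p _
    by_cases hp : p = (y, x)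
    · subst hp
      simp only [h9, and_false]
    · have : ¬(p.1 = y ∧ p.2 = x) := fun ⟨a, b⟩ => hp (Prod.ext a b)
      rw [gV_setV_ne this]


theorem mkVis_row (t : List (List Int)) (y : Nat) :
    (mkVis t).getD y [] = (t.getD y []).map (fun _ => false) := by
  unfold mkVis
  exact List.getD_map t [] _

theorem shape_mkVis (t : List (List Int)) : Shape (mkVis t) t := by
  refine ⟨List.length_map _, fun y => ?_⟩
  rw [mkVis_row, List.length_map]

theorem gV_mkVis {t : List (List Int)} {y x : Nat} :
    gV (mkVis t) y x = false ↔ inB t (y, x) := by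
  unfold gV
  rw [mkVis_row]
  constructor
  · intro h
    have hx : x < ((t.getD y []).map (fun _ => false)).length := by
      by_contra hc
      rw [getD_default (by omega)] at h; simp at h
    rw [List.length_map] at hx
    have hy : y < t.length := by
      by_contra hc
      rw [getD_default (l := t) (by omega)] at hx; simp at hx
    exact ⟨hy, hx⟩
  · rintro ⟨hy, hx⟩
    rw [List.getD_eq_getElem _ true (by rw [List.length_map]; exact hx)]
    simp

theorem countF_cons (w : List Bool) (ws : List (List Bool)) :
    countF (w :: ws) = w.count false + countF ws := by
  unfold countF
  rw [List.length_cons, Finset.sum_range_succ']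
  simp [Nat.add_comm]

theorem countF_mkVis (t : List (List Int)) : countF (mkVis t) = (t.map List.length).sum := by
  induction t with
  | nil => simp [countF, mkVis]
  | cons r rs ih =>
    show countF ((r.map _) :: mkVis rs) = _
    rw [countF_cons, ih]
    simp [List.map_const']

theorem count9_mkVis {t : List (List Int)} (hPre : Rect t) : count9 t (mkVis t) = 0 := by
  unfold count9
  rw [Finset.card_eq_zero, Finset.filter_eq_empty_iff]
  rintro p hp
  rw [Finset.mem_product, Finset.mem_range, Finset.mem_range] at hp
  intro ⟨hgv, _⟩
  have hin : inB t p := ⟨hp.1, by rw [rowlen_C hPre hp.1]; exact hp.2⟩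
  have hf : gV (mkVis t) p.1 p.2 = false := gV_mkVis.mpr hin
  rw [hf] at hgv
  exact Bool.noConfusion hgv

-- steps and reachability
def adj (p q : Nat × Nat) : Prop :=
  (p.1 = q.1 + 1 ∧ p.2 = q.2) ∨ (q.1 = p.1 + 1 ∧ p.2 = q.2) ∨
  (p.2 = q.2 + 1 ∧ p.1 = q.1) ∨ (q.2 = p.2 + 1 ∧ p.1 = q.1)

def okstep (t : List (List Int)) (p q : Nat × Nat) : Prop :=
  adj p q ∧ inB t q ∧ gH t q.1 q.2 = gH t p.1 p.2 + 1 ∧ gH t p.1 p.2 ≠ 9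

inductive RA (t : List (List Int)) (v : List (List Bool)) : (Nat × Nat) → (Nat × Nat) → Prop
  | refl (p) : RA t v p p
  | tail {p q r} : RA t v p q → okstep t q r → gV v r.1 r.2 = false → RA t v p r

def pstep (t : List (List Int)) (p q : Nat × Nat) : Prop :=
  adj p q ∧ inB t q ∧ gH t q.1 q.2 = gH t p.1 p.2 + 1

def PathN (t : List (List Int)) : Nat → (Nat × Nat) → (Nat × Nat) → Prop
  | 0, c, p => p = c
  | (k+1), c, p => ∃ q, PathN t k c q ∧ pstep t q p

theorem RA_anti {t : List (List Int)} {v w : List (List Bool)}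
    (hvw : ∀ a b, gV v a b = true → gV w a b = true) {c p} (h : RA t w c p) : RA t v c p := by
  induction h with
  | refl => exact RA.refl _
  | tail _ hstep hunv ih =>
    refine RA.tail ih hstep ?_
    cases hv : gV v _ _ with
    | false => rfl
    | true => rw [hvw _ _ hv] at hunv; exact Bool.noConfusion hunv

theorem RA_trans {t v} {a b c : Nat × Nat} (h1 : RA t v a b) (h2 : RA t v b c) : RA t v a c := by
  induction h2 with
  | refl => exact h1
  | tail _ hstep hunv ih => exact RA.tail ih hstep hunv

theorem PathN_height {t : List (List Int)} {k : Nat} {c p : Nat × Nat}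
    (h : PathN t k c p) : gH t p.1 p.2 = gH t c.1 c.2 + k := by
  induction k generalizing p with
  | zero => cases h; simp
  | succ k ih =>
    obtain ⟨q, hq, hstep⟩ := h
    rw [hstep.2.2, ih hq]
    push_cast
    ring

theorem PathN_inB {t : List (List Int)} {k : Nat} {c p : Nat × Nat}
    (hc : inB t c) (h : PathN t k c p) : inB t p := by
  cases k with
  | zero => cases h; exact hc
  | succ k => obtain ⟨q, _, hstep⟩ := h; exact hstep.2.1

def Post (t : List (List Int)) (c : Nat × Nat) (v : List (List Bool))
    (r : Int × List (List Bool)) : Prop :=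
  Shape r.2 t ∧ countF r.2 < countF v ∧
  (∀ a b, gV v a b = true → gV r.2 a b = true) ∧
  gV r.2 c.1 c.2 = true ∧
  (∀ p, gV r.2 p.1 p.2 = true → gV v p.1 p.2 = true ∨ RA t v c p) ∧
  (∀ p q, gV r.2 p.1 p.2 = true → gV v p.1 p.2 = false → okstep t p q →
    gV r.2 q.1 q.2 = true) ∧
  r.1 = (count9 t r.2 : Int) - (count9 t v : Int)

-- the four sequential neighbour stages of one trailDFS call, named for the proofs
def acc0D (v : List (List Bool)) (y x : Nat) : Int × List (List Bool) := ((0 : Int), setV v y x)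
def acc1D (f : Nat) (t : List (List Int)) (x y : Nat) (v : List (List Bool)) : Int × List (List Bool) :=
  if 0 < y ∧ gH t (y-1) x = gH t y x + 1 ∧ gV (acc0D v y x).2 (y-1) x = false then
    (let rr := trailDFS f t x (y-1) (acc0D v y x).2; ((acc0D v y x).1 + rr.1, rr.2))
  else acc0D v y x
def acc2D (f : Nat) (t : List (List Int)) (x y : Nat) (v : List (List Bool)) : Int × List (List Bool) :=
  if 0 < x ∧ gH t y (x-1) = gH t y x + 1 ∧ gV (acc1D f t x y v).2 y (x-1) = false then
    (let rr := trailDFS f t (x-1) y (acc1D f t x y v).2; ((acc1D f t x y v).1 + rr.1, rr.2))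
  else acc1D f t x y v
def acc3D (f : Nat) (t : List (List Int)) (x y : Nat) (v : List (List Bool)) : Int × List (List Bool) :=
  if y + 1 < t.length ∧ gH t (y+1) x = gH t y x + 1 ∧ gV (acc2D f t x y v).2 (y+1) x = false then
    (let rr := trailDFS f t x (y+1) (acc2D f t x y v).2; ((acc2D f t x y v).1 + rr.1, rr.2))
  else acc2D f t x y v
def acc4D (f : Nat) (t : List (List Int)) (x y : Nat) (v : List (List Bool)) : Int × List (List Bool) :=
  if x + 1 < (t.getD y []).length ∧ gH t y (x+1) = gH t y x + 1 ∧ gV (acc3D f t x y v).2 y (x+1) = false then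
    (let rr := trailDFS f t (x+1) y (acc3D f t x y v).2; ((acc3D f t x y v).1 + rr.1, rr.2))
  else acc3D f t x y v

theorem trailDFS_succ (f : Nat) (t : List (List Int)) (x y : Nat) (v : List (List Bool)) :
    trailDFS (f+1) t x y v =
      if gH t y x = 9 then ((1 : Int), setV v y x) else acc4D f t x y v := rfl

theorem stage {t : List (List Int)} {f : Nat}
    (IH : ∀ x y v, Shape v t → gV v y x = false → countF v < f →
      Post t (y, x) v (trailDFS f t x y v))
    (cond : Prop) [Decidable cond] (ny nx : Nat) (acc : Int × List (List Bool))
    (hs : Shape acc.2 t) (hcf : countF acc.2 < f)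
    (hcond : cond → gV acc.2 ny nx = false)
    (r : Int × List (List Bool))
    (hr : r = if cond then (let rr := trailDFS f t nx ny acc.2; (acc.1 + rr.1, rr.2)) else acc) :
    Shape r.2 t ∧ countF r.2 ≤ countF acc.2 ∧
    (∀ a b, gV acc.2 a b = true → gV r.2 a b = true) ∧
    (cond → gV r.2 ny nx = true) ∧
    (∀ p, gV r.2 p.1 p.2 = true → gV acc.2 p.1 p.2 = true ∨ (cond ∧ RA t acc.2 (ny, nx) p)) ∧
    (∀ p q, gV r.2 p.1 p.2 = true → gV acc.2 p.1 p.2 = false → okstep t p q →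
      gV r.2 q.1 q.2 = true) ∧
    r.1 = acc.1 + ((count9 t r.2 : Int) - (count9 t acc.2 : Int)) := by
  subst hr
  by_cases hc : cond
  · rw [if_pos hc]
    obtain ⟨p1, p2, p3, p4, p5, p6, p7⟩ := IH nx ny acc.2 hs (hcond hc) hcf
    refine ⟨p1, Nat.le_of_lt p2, p3, fun _ => p4, ?_, p6, ?_⟩
    · intro p hp
      rcases p5 p hp with h | h
      · exact Or.inl h
      · exact Or.inr ⟨hc, h⟩
    · show acc.1 + (trailDFS f t nx ny acc.2).1 =
        acc.1 + ((count9 t (trailDFS f t nx ny acc.2).2 : Int) - (count9 t acc.2 : Int))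
      rw [p7]
  · rw [if_neg hc]
    refine ⟨hs, Nat.le_refl _, fun _ _ h => h, fun h => absurd h hc, fun p hp => Or.inl hp,
      ?_, by omega⟩
    intro p q hp hnp _
    rw [hp] at hnp; exact Bool.noConfusion hnp

theorem fwd_step {t : List (List Int)} {v W : List (List Bool)} {y x : Nat} {n p : Nat × Nat}
    (h9 : gH t y x ≠ 9) (monoW : ∀ a b, gV v a b = true → gV W a b = true) (shW : Shape W t)
    (hadj : adj (y, x) n) (hh : gH t n.1 n.2 = gH t y x + 1) (hgv : gV W n.1 n.2 = false)
    (hRA : RA t W n p) : RA t v (y, x) p := by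
  have hvn : gV v n.1 n.2 = false := by
    cases hc : gV v n.1 n.2 with
    | false => rfl
    | true => rw [monoW _ _ hc] at hgv; exact Bool.noConfusion hgv
  have hok : okstep t (y, x) n := ⟨hadj, gV_false_inB shW hgv, hh, h9⟩
  exact RA_trans (RA.tail (RA.refl _) hok hvn) (RA_anti monoW hRA)

theorem dfs_post {t : List (List Int)} (hPre : Rect t) :
    ∀ (fuel : Nat) (x y : Nat) (v : List (List Bool)),
      Shape v t → gV v y x = false → countF v < fuel →
      Post t (y, x) v (trailDFS fuel t x y v) := by
  intro fuel
  induction fuel with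
  | zero => intro x y v _ _ hf; omega
  | succ f IH =>
    intro x y v hs hv hf
    have hyx := gV_false_lt hv
    have hv0s : Shape (setV v y x) t := shape_setV hs y x
    have hv0lt : countF (setV v y x) < countF v := countF_setV_lt hv
    have hmark : gV (setV v y x) y x = true := gV_setV_self hyx.1 hyx.2
    have hbody := trailDFS_succ f t x y v
    by_cases h9 : gH t y x = 9
    · rw [hbody, if_pos h9]
      refine ⟨hv0s, hv0lt, fun a b => gV_setV_mono, hmark, ?_, ?_, ?_⟩
      · intro p hp
        rcases gV_setV_cases hp with h | ⟨h1, h2⟩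
        · exact Or.inl h
        · right
          have hpc : p = (y, x) := Prod.ext h1 h2
          rw [hpc]; exact RA.refl _
      · intro p q hp hnp hstep
        rcases gV_setV_cases hp with h | ⟨h1, h2⟩
        · rw [h] at hnp; exact Bool.noConfusion hnp
        · exact absurd (h1 ▸ h2 ▸ h9) hstep.2.2.2
      · show (1 : Int) = (count9 t (setV v y x) : Int) - (count9 t v : Int)
        rw [count9_setV hPre hs hv, if_pos h9]
        push_cast; ring
    · rw [hbody, if_neg h9]
      have hacc0 : acc0D v y x = ((0 : Int), setV v y x) := rfl
      set acc0 := acc0D v y x with hacc0'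
      set acc1 := acc1D f t x y v with hacc1'
      set acc2 := acc2D f t x y v with hacc2'
      set acc3 := acc3D f t x y v with hacc3'
      set acc4 := acc4D f t x y v with hacc4'
      have hA0_1 : acc0.1 = (0 : Int) := rfl
      have hA0_2 : acc0.2 = setV v y x := rfl
      have hcf0 : countF acc0.2 = countF (setV v y x) := by rw [hA0_2]
      obtain ⟨sh1, cf1, mono1, mark1, fwd1, cl1, cnt1⟩ :=
        stage (t := t) (f := f) IH
          (0 < y ∧ gH t (y-1) x = gH t y x + 1 ∧ gV acc0.2 (y-1) x = false)
          (y-1) x acc0 hv0s (by omega) (fun hc => hc.2.2) acc1 (by rw [hacc1', acc1D, hacc0'])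
      obtain ⟨sh2, cf2, mono2, mark2, fwd2, cl2, cnt2⟩ :=
        stage (t := t) (f := f) IH
          (0 < x ∧ gH t y (x-1) = gH t y x + 1 ∧ gV acc1.2 y (x-1) = false)
          y (x-1) acc1 sh1 (by omega) (fun hc => hc.2.2) acc2 (by rw [hacc2', acc2D, hacc1'])
      obtain ⟨sh3, cf3, mono3, mark3, fwd3, cl3, cnt3⟩ :=
        stage (t := t) (f := f) IH
          (y + 1 < t.length ∧ gH t (y+1) x = gH t y x + 1 ∧ gV acc2.2 (y+1) x = false)
          (y+1) x acc2 sh2 (by omega) (fun hc => hc.2.2) acc3 (by rw [hacc3', acc3D, hacc2'])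
      obtain ⟨sh4, cf4, mono4, mark4, fwd4, cl4, cnt4⟩ :=
        stage (t := t) (f := f) IH
          (x + 1 < (t.getD y []).length ∧ gH t y (x+1) = gH t y x + 1 ∧ gV acc3.2 y (x+1) = false)
          y (x+1) acc3 sh3 (by omega) (fun hc => hc.2.2) acc4 (by rw [hacc4', acc4D, hacc3'])
      -- mono compositions
      have monoTo0 : ∀ a b, gV v a b = true → gV acc0.2 a b = true := fun a b h => gV_setV_mono h
      have monoTo1 : ∀ a b, gV v a b = true → gV acc1.2 a b = true :=
        fun a b h => mono1 a b (monoTo0 a b h)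
      have monoTo2 : ∀ a b, gV v a b = true → gV acc2.2 a b = true :=
        fun a b h => mono2 a b (monoTo1 a b h)
      have monoTo3 : ∀ a b, gV v a b = true → gV acc3.2 a b = true :=
        fun a b h => mono3 a b (monoTo2 a b h)
      have m1to4 : ∀ a b, gV acc1.2 a b = true → gV acc4.2 a b = true :=
        fun a b h => mono4 a b (mono3 a b (mono2 a b h))
      have m2to4 : ∀ a b, gV acc2.2 a b = true → gV acc4.2 a b = true :=
        fun a b h => mono4 a b (mono3 a b h)
      have m3to4 : ∀ a b, gV acc3.2 a b = true → gV acc4.2 a b = true :=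
        fun a b h => mono4 a b h
      have m0to4 : ∀ a b, gV acc0.2 a b = true → gV acc4.2 a b = true :=
        fun a b h => m1to4 a b (mono1 a b h)
      refine ⟨sh4, by omega, fun a b h => m0to4 a b (monoTo0 a b h),
        m0to4 y x hmark, ?_, ?_, ?_⟩
      · -- forward: marked implies old or reachable
        intro p hp
        rcases fwd4 p hp with hp3 | ⟨hc4, hRA4⟩
        · rcases fwd3 p hp3 with hp2 | ⟨hc3, hRA3⟩
          · rcases fwd2 p hp2 with hp1 | ⟨hc2, hRA2⟩
            · rcases fwd1 p hp1 with hp0 | ⟨hc1, hRA1⟩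
              · rcases gV_setV_cases hp0 with h | ⟨h1, h2⟩
                · exact Or.inl h
                · right
                  have hpc : p = (y, x) := Prod.ext h1 h2
                  rw [hpc]; exact RA.refl _
              · obtain ⟨hg1, hg2, hg3⟩ := hc1
                exact Or.inr (fwd_step (n := (y-1, x)) h9 monoTo0 hv0s
                  (Or.inl ⟨by omega, rfl⟩) hg2 hg3 hRA1)
            · obtain ⟨hg1, hg2, hg3⟩ := hc2
              exact Or.inr (fwd_step (n := (y, x-1)) h9 monoTo1 sh1
                (Or.inr (Or.inr (Or.inl ⟨by omega, rfl⟩))) hg2 hg3 hRA2)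
          · obtain ⟨hg1, hg2, hg3⟩ := hc3
            exact Or.inr (fwd_step (n := (y+1, x)) h9 monoTo2 sh2
              (Or.inr (Or.inl ⟨rfl, rfl⟩)) hg2 hg3 hRA3)
        · obtain ⟨hg1, hg2, hg3⟩ := hc4
          exact Or.inr (fwd_step (n := (y, x+1)) h9 monoTo3 sh3
            (Or.inr (Or.inr (Or.inr ⟨rfl, rfl⟩))) hg2 hg3 hRA4)
      · -- closure
        intro p q hp hnp hstep
        by_cases hpc : p = (y, x)
        · subst hpc
          obtain ⟨hadj, hinq, hhq, _⟩ := hstep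
          rcases hadj with ⟨ha1, ha2⟩ | ⟨ha1, ha2⟩ | ⟨ha1, ha2⟩ | ⟨ha1, ha2⟩
          · -- q = (y-1, x), up
            have hq : q = (y-1, x) := Prod.ext (by omega) ha2.symm
            subst hq
            cases hg : gV acc0.2 (y-1) x with
            | true => exact m0to4 _ _ hg
            | false => exact m1to4 _ _ (mark1 ⟨by omega, hhq, hg⟩)
          · -- q = (y+1, x), down
            have hq : q = (y+1, x) := Prod.ext (by omega) ha2.symm
            subst hq
            cases hg : gV acc2.2 (y+1) x with
            | true => exact m2to4 _ _ hg
            | false => exact m3to4 _ _ (mark3 ⟨by exact hinq.1, hhq, hg⟩)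
          · -- q = (y, x-1), left
            have hq : q = (y, x-1) := Prod.ext ha2.symm (by omega)
            subst hq
            cases hg : gV acc1.2 y (x-1) with
            | true => exact m1to4 _ _ hg
            | false => exact m2to4 _ _ (mark2 ⟨by omega, hhq, hg⟩)
          · -- q = (y, x+1), right
            have hq : q = (y, x+1) := Prod.ext ha2.symm (by omega)
            subst hq
            cases hg : gV acc3.2 y (x+1) with
            | true => exact m3to4 _ _ hg
            | false => exact mark4 ⟨by exact hinq.2, hhq, hg⟩
        · -- p marked by one of the recursive calls
          have hnp0 : gV acc0.2 p.1 p.2 = false := by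
            rw [hA0_2, gV_setV_ne (fun hh => hpc (Prod.ext hh.1 hh.2))]
            exact hnp
          by_cases h1 : gV acc1.2 p.1 p.2 = true
          · exact m1to4 _ _ (cl1 p q h1 hnp0 hstep)
          · by_cases h2 : gV acc2.2 p.1 p.2 = true
            · exact m2to4 _ _ (cl2 p q h2 (Bool.not_eq_true _ ▸ h1) hstep)
            · by_cases h3 : gV acc3.2 p.1 p.2 = true
              · exact m3to4 _ _ (cl3 p q h3 (Bool.not_eq_true _ ▸ h2) hstep)
              · exact cl4 p q hp (Bool.not_eq_true _ ▸ h3) hstep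
      · -- score counts the newly visited 9-cells
        have hc90 : count9 t acc0.2 = count9 t v := by
          rw [hA0_2, count9_setV hPre hs hv, if_neg h9]
          omega
        show acc4.1 = (count9 t acc4.2 : Int) - (count9 t v : Int)
        rw [cnt4, cnt3, cnt2, cnt1, hA0_1, hc90]
        ring

theorem RA_marked {t : List (List Int)} {c : Nat × Nat} {v : List (List Bool)}
    {r : Int × List (List Bool)} (hp : Post t c v r) (hc : gV v c.1 c.2 = false) :
    ∀ p, RA t v c p → gV r.2 p.1 p.2 = true ∧ gV v p.1 p.2 = false := by
  intro p h
  obtain ⟨_, _, _, hmark, _, hcl, _⟩ := hp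
  induction h with
  | refl => exact ⟨hmark, hc⟩
  | tail _ hstep hunv ih => exact ⟨hcl _ _ ih.1 ih.2 hstep, hunv⟩

-- ===== B port =====
def genCond (t : List (List Int)) (rows : Nat) (h : Int) (c p : Nat × Nat) : Prop :=
  (0 < c.1 ∧ c.2 < (t.getD (c.1-1) []).length ∧ gH t (c.1-1) c.2 = h ∧ p = (c.1-1, c.2)) ∨
  (c.1 + 1 < rows ∧ c.2 < (t.getD (c.1+1) []).length ∧ gH t (c.1+1) c.2 = h ∧ p = (c.1+1, c.2)) ∨
  (0 < c.2 ∧ gH t c.1 (c.2-1) = h ∧ p = (c.1, c.2-1)) ∨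
  (c.2 + 1 < (t.getD c.1 []).length ∧ gH t c.1 (c.2+1) = h ∧ p = (c.1, c.2+1))

theorem mem_condAdd {C : Prop} [Decidable C] {s : List (Nat × Nat)} {q p : Nat × Nat} :
    p ∈ (if C then PySem.Set.add s q else s) ↔ p ∈ s ∨ (C ∧ p = q) := by
  split
  · rw [PySem.Set.mem_add]; tauto
  · tauto

theorem nodup_condAdd {C : Prop} [Decidable C] {s : List (Nat × Nat)} {q : Nat × Nat}
    (hs : s.Nodup) : (if C then PySem.Set.add s q else s).Nodup := by
  split
  · exact PySem.Set.nodup_add _ _ hs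
  · exact hs

theorem mem_bStep_aux (t : List (List Int)) (rows : Nat) (h : Int) :
    ∀ (cells acc : List (Nat × Nat)) (p : Nat × Nat),
      p ∈ cells.foldl (fun nxt c =>
        let nxt := if 0 < c.1 ∧ c.2 < (t.getD (c.1-1) []).length ∧ gH t (c.1-1) c.2 = h then
                     PySem.Set.add nxt (c.1-1, c.2) else nxt
        let nxt := if c.1 + 1 < rows ∧ c.2 < (t.getD (c.1+1) []).length ∧ gH t (c.1+1) c.2 = h then
                     PySem.Set.add nxt (c.1+1, c.2) else nxt
        let nxt := if 0 < c.2 ∧ gH t c.1 (c.2-1) = h then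
                     PySem.Set.add nxt (c.1, c.2-1) else nxt
        let nxt := if c.2 + 1 < (t.getD c.1 []).length ∧ gH t c.1 (c.2+1) = h then
                     PySem.Set.add nxt (c.1, c.2+1) else nxt
        nxt) acc ↔ p ∈ acc ∨ ∃ c ∈ cells, genCond t rows h c p := by
  intro cells
  induction cells with
  | nil => simp
  | cons c cs ih =>
    intro acc p
    rw [List.foldl_cons, ih]
    simp only [mem_condAdd, genCond, List.mem_cons]
    constructor
    · rintro (((((hp | hc) | hc) | hc) | hc) | ⟨c', hc', hg⟩)
      · exact Or.inl hp
      · exact Or.inr ⟨c, Or.inl rfl, Or.inl ⟨hc.1.1, hc.1.2.1, hc.1.2.2, hc.2⟩⟩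
      · exact Or.inr ⟨c, Or.inl rfl, Or.inr (Or.inl ⟨hc.1.1, hc.1.2.1, hc.1.2.2, hc.2⟩)⟩
      · exact Or.inr ⟨c, Or.inl rfl, Or.inr (Or.inr (Or.inl ⟨hc.1.1, hc.1.2, hc.2⟩))⟩
      · exact Or.inr ⟨c, Or.inl rfl, Or.inr (Or.inr (Or.inr ⟨hc.1.1, hc.1.2, hc.2⟩))⟩
      · exact Or.inr ⟨c', Or.inr hc', hg⟩
    · rintro (hp | ⟨c', (rfl | hc'), hg⟩)
      · exact Or.inl (Or.inl (Or.inl (Or.inl (Or.inl hp))))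
      · rcases hg with ⟨h1, h2, h3, h4⟩ | ⟨h1, h2, h3, h4⟩ | ⟨h1, h2, h3⟩ | ⟨h1, h2, h3⟩
        · exact Or.inl (Or.inl (Or.inl (Or.inl (Or.inr ⟨⟨h1, h2, h3⟩, h4⟩))))
        · exact Or.inl (Or.inl (Or.inl (Or.inr ⟨⟨h1, h2, h3⟩, h4⟩)))
        · exact Or.inl (Or.inl (Or.inr ⟨⟨h1, h2⟩, h3⟩))
        · exact Or.inl (Or.inr ⟨⟨h1, h2⟩, h3⟩)
      · exact Or.inr ⟨c', hc', hg⟩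

theorem mem_bStep {t : List (List Int)} {rows : Nat} {h : Int} {cells : List (Nat × Nat)}
    {p : Nat × Nat} :
    p ∈ (bStep t rows h cells : List (Nat × Nat)) ↔ ∃ c ∈ cells, genCond t rows h c p := by
  rw [bStep, mem_bStep_aux]
  simp [PySem.Set.empty]

theorem nodup_bStep {t : List (List Int)} {rows : Nat} {h : Int} {cells : List (Nat × Nat)} :
    (bStep t rows h cells : List (Nat × Nat)).Nodup := by
  rw [bStep]
  have : ∀ (cs : List (Nat × Nat)) (acc : List (Nat × Nat)), acc.Nodup →
      (cs.foldl (fun nxt c =>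
        let nxt := if 0 < c.1 ∧ c.2 < (t.getD (c.1-1) []).length ∧ gH t (c.1-1) c.2 = h then
                     PySem.Set.add nxt (c.1-1, c.2) else nxt
        let nxt := if c.1 + 1 < rows ∧ c.2 < (t.getD (c.1+1) []).length ∧ gH t (c.1+1) c.2 = h then
                     PySem.Set.add nxt (c.1+1, c.2) else nxt
        let nxt := if 0 < c.2 ∧ gH t c.1 (c.2-1) = h then
                     PySem.Set.add nxt (c.1, c.2-1) else nxt
        let nxt := if c.2 + 1 < (t.getD c.1 []).length ∧ gH t c.1 (c.2+1) = h then
                     PySem.Set.add nxt (c.1, c.2+1) else nxt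
        nxt) acc).Nodup := by
    intro cs
    induction cs with
    | nil => intro acc ha; exact ha
    | cons c cs ih =>
      intro acc ha
      rw [List.foldl_cons]
      exact ih _ (nodup_condAdd (nodup_condAdd (nodup_condAdd (nodup_condAdd ha))))
  exact this cells [] List.nodup_nil

def cellsInv (t : List (List Int)) (c : Nat × Nat) (k : Nat) (cells : List (Nat × Nat)) : Prop :=
  cells.Nodup ∧ ∀ p, p ∈ cells ↔ PathN t k c p

theorem gen_iff {t : List (List Int)} {c p : Nat × Nat} (hc : inB t c) {h : Int}
    (hgc : gH t c.1 c.2 + 1 = h) :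
    genCond t t.length h c p ↔ (pstep t c p ∧ gH t p.1 p.2 = h) := by
  obtain ⟨c1, c2⟩ := c
  obtain ⟨p1, p2⟩ := p
  simp only [genCond, pstep, adj, inB] at *
  constructor
  · rintro (⟨h1, h2, h3, h4⟩ | ⟨h1, h2, h3, h4⟩ | ⟨h1, h2, h3⟩ | ⟨h1, h2, h3⟩)
    · rcases Prod.mk.injEq .. ▸ h4 with ⟨rfl, rfl⟩
      exact ⟨⟨Or.inl ⟨by omega, rfl⟩, ⟨by omega, h2⟩, by omega⟩, h3⟩
    · rcases Prod.mk.injEq .. ▸ h4 with ⟨rfl, rfl⟩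
      exact ⟨⟨Or.inr (Or.inl ⟨rfl, rfl⟩), ⟨h1, h2⟩, by omega⟩, h3⟩
    · rcases Prod.mk.injEq .. ▸ h3 with ⟨rfl, rfl⟩
      exact ⟨⟨Or.inr (Or.inr (Or.inl ⟨by omega, rfl⟩)), ⟨hc.1, by omega⟩, by omega⟩, h2⟩
    · rcases Prod.mk.injEq .. ▸ h3 with ⟨rfl, rfl⟩
      exact ⟨⟨Or.inr (Or.inr (Or.inr ⟨rfl, rfl⟩)), ⟨hc.1, h1⟩, by omega⟩, h2⟩
  · rintro ⟨⟨hadj, hinp, hh⟩, hgp⟩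
    rcases hadj with ⟨a1, a2⟩ | ⟨a1, a2⟩ | ⟨a1, a2⟩ | ⟨a1, a2⟩
    · refine Or.inl ⟨by omega, ?_, ?_, ?_⟩
      · rw [show c1 - 1 = p1 by omega]; omega
      · rw [show c1 - 1 = p1 by omega, show c2 = p2 by omega]; exact hgp
      · exact Prod.ext (by omega) (by omega)
    · refine Or.inr (Or.inl ⟨?_, ?_, ?_, ?_⟩)
      · omega
      · rw [show c1 + 1 = p1 by omega]; omega
      · rw [show c1 + 1 = p1 by omega, show c2 = p2 by omega]; exact hgp
      · exact Prod.ext (by omega) (by omega)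
    · refine Or.inr (Or.inr (Or.inl ⟨by omega, ?_, ?_⟩))
      · rw [show c2 - 1 = p2 by omega, show c1 = p1 by omega]; exact hgp
      · exact Prod.ext (by omega) (by omega)
    · refine Or.inr (Or.inr (Or.inr ⟨?_, ?_, ?_⟩))
      · rw [a2]; omega
      · rw [show c2 + 1 = p2 by omega, show c1 = p1 by omega]; exact hgp
      · exact Prod.ext (by omega) (by omega)

theorem bStep_spec {t : List (List Int)} {c0 : Nat × Nat} (hc0 : inB t c0)
    (hg0 : gH t c0.1 c0.2 = 0) (k : Nat) {cells : List (Nat × Nat)}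
    (hinv : cellsInv t c0 k cells) {h : Int} (hh : h = (k : Int) + 1) :
    cellsInv t c0 (k+1) (bStep t t.length h cells) := by
  constructor
  · exact nodup_bStep
  · intro p
    rw [mem_bStep]
    constructor
    · rintro ⟨c, hcmem, hgen⟩
      have hPk : PathN t k c0 c := (hinv.2 c).mp hcmem
      have hcB : inB t c := PathN_inB hc0 hPk
      have hgc : gH t c.1 c.2 + 1 = h := by rw [PathN_height hPk, hg0, hh]; ring
      obtain ⟨hps, _⟩ := (gen_iff hcB hgc).mp hgen
      exact ⟨c, hPk, hps⟩
    · rintro ⟨q, hPq, hps⟩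
      have hqB := PathN_inB hc0 hPq
      have hgq : gH t q.1 q.2 + 1 = h := by rw [PathN_height hPq, hg0, hh]; ring
      refine ⟨q, (hinv.2 q).mpr hPq, (gen_iff hqB hgq).mpr ⟨hps, ?_⟩⟩
      rw [hps.2.2, ← hgq]

theorem bScore_spec {t : List (List Int)} {y x : Nat} (hc : inB t (y, x))
    (hg0 : gH t y x = 0) :
    ∃ cells : List (Nat × Nat), bScore t y x = (cells.length : Int) ∧
      cellsInv t (y, x) 9 cells := by
  have hr : PySem.List.pyRange 1 10 1 = [1, 2, 3, 4, 5, 6, 7, 8, 9] := by decide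
  have hadd : (PySem.Set.add PySem.Set.empty (y, x) : List (Nat × Nat)) = [(y, x)] := rfl
  have h0 : cellsInv t (y, x) 0 (PySem.Set.add PySem.Set.empty (y, x)) := by
    rw [hadd]
    refine ⟨List.nodup_singleton _, fun p => ?_⟩
    show p ∈ [(y, x)] ↔ PathN t 0 (y, x) p
    simp [PathN]
  have h1 := bStep_spec hc hg0 0 h0 (h := 1) (by norm_num)
  have h2 := bStep_spec hc hg0 1 h1 (h := 2) (by norm_num)
  have h3 := bStep_spec hc hg0 2 h2 (h := 3) (by norm_num)
  have h4 := bStep_spec hc hg0 3 h3 (h := 4) (by norm_num)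
  have h5 := bStep_spec hc hg0 4 h4 (h := 5) (by norm_num)
  have h6 := bStep_spec hc hg0 5 h5 (h := 6) (by norm_num)
  have h7 := bStep_spec hc hg0 6 h6 (h := 7) (by norm_num)
  have h8 := bStep_spec hc hg0 7 h7 (h := 8) (by norm_num)
  have h9 := bStep_spec hc hg0 8 h8 (h := 9) (by norm_num)
  refine ⟨_, ?_, h9⟩
  show bScore t y x = _
  rw [bScore, hr]
  simp only [List.foldl_cons, List.foldl_nil]

theorem RA_allF_of_PathN {t : List (List Int)} {c : Nat × Nat} (_hc : inB t c)
    (h0 : gH t c.1 c.2 = 0) : ∀ (k : Nat), k ≤ 9 → ∀ {p}, PathN t k c p →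
    RA t (mkVis t) c p := by
  intro k
  induction k with
  | zero => intro _ p h; cases h; exact RA.refl _
  | succ k ih =>
    intro hk p h
    obtain ⟨q, hq, hps⟩ := h
    have hgq : gH t q.1 q.2 = (k : Int) := by rw [PathN_height hq, h0]; ring
    have h9q : gH t q.1 q.2 ≠ 9 := by rw [hgq]; intro he; omega
    refine RA.tail (ih (by omega) hq) ⟨hps.1, hps.2.1, hps.2.2, h9q⟩ ?_
    exact gV_mkVis.mpr hps.2.1

theorem PathN_of_RA {t : List (List Int)} {c : Nat × Nat} {p : Nat × Nat}
    (h : RA t (mkVis t) c p) : ∃ k, PathN t k c p := by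
  induction h with
  | refl => exact ⟨0, rfl⟩
  | tail _ hstep _ ih =>
    obtain ⟨k, hk⟩ := ih
    exact ⟨k + 1, _, hk, hstep.1, hstep.2.1, hstep.2.2.1⟩

theorem PathN9_of_RA {t : List (List Int)} {c : Nat × Nat} (_hc : inB t c)
    (h0 : gH t c.1 c.2 = 0) {p} (h : RA t (mkVis t) c p) (h9 : gH t p.1 p.2 = 9) :
    PathN t 9 c p := by
  obtain ⟨k, hk⟩ := PathN_of_RA h
  have := PathN_height hk
  rw [h0, h9] at this
  have hk9 : k = 9 := by omega
  rw [← hk9]; exact hk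

theorem score_eq {t : List (List Int)} (hPre : Rect t) {y x : Nat}
    (hy : y < t.length) (hx : x < (t.getD y []).length) (h0 : gH t y x = 0) :
    (trailDFS ((t.map List.length).sum + 1) t x y (mkVis t)).1 = bScore t y x := by
  have hin : inB t (y, x) := ⟨hy, hx⟩
  have hv : gV (mkVis t) y x = false := gV_mkVis.mpr hin
  have hf : countF (mkVis t) < (t.map List.length).sum + 1 := by rw [countF_mkVis]; omega
  have post := dfs_post hPre ((t.map List.length).sum + 1) x y (mkVis t) (shape_mkVis t) hv hf
  obtain ⟨cells, hbs, hnodup, hmem⟩ := bScore_spec hin h0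
  rw [post.2.2.2.2.2.2, count9_mkVis hPre, hbs]
  have hcc : count9 t (trailDFS ((t.map List.length).sum + 1) t x y (mkVis t)).2 =
      cells.length := by
    unfold count9
    rw [← List.toFinset_card_of_nodup hnodup]
    congr 1
    ext p
    rw [Finset.mem_filter, Finset.mem_product, Finset.mem_range, Finset.mem_range,
      List.mem_toFinset, hmem p]
    constructor
    · rintro ⟨⟨hp1, hp2⟩, hgv, hg9⟩
      have hpin : inB t p := ⟨hp1, by rw [rowlen_C hPre hp1]; exact hp2⟩
      have hmk : gV (mkVis t) p.1 p.2 = false := gV_mkVis.mpr hpin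
      rcases post.2.2.2.2.1 p hgv with hmkT | hRA
      · rw [hmk] at hmkT; exact Bool.noConfusion hmkT
      · exact PathN9_of_RA hin h0 hRA hg9
    · intro hP9
      have hRA := RA_allF_of_PathN hin h0 9 (by omega) hP9
      have hpin : inB t p := PathN_inB hin hP9
      have hg9 : gH t p.1 p.2 = 9 := by rw [PathN_height hP9, h0]; norm_num
      refine ⟨⟨hpin.1, ?_⟩, (RA_marked post hv p hRA).1, hg9⟩
      rw [← rowlen_C hPre hpin.1]; exact hpin.2
  rw [hcc]
  push_cast
  ring

-- ---- loop-to-sum conversions ----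
theorem foldl_addlike (l : List Nat) (f : Int → Nat → Int) (g : Nat → Int)
    (hf : ∀ acc i, f acc i = acc + g i) : ∀ a, l.foldl f a = a + (l.map g).sum := by
  induction l with
  | nil => intro a; simp
  | cons i l ih => intro a; rw [List.foldl_cons, hf, ih]; simp [add_assoc]

theorem map_range_sum (g : Nat → Int) (n : Nat) :
    ((List.range n).map g).sum = ∑ i ∈ Finset.range n, g i := by
  induction n with
  | zero => simp
  | succ n ih => rw [List.range_succ, List.map_append, List.sum_append, Finset.sum_range_succ, ih]; simp


theorem part1_sum (t : List (List Int)) :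
    part1 t = ∑ y ∈ Finset.range t.length, ∑ x ∈ Finset.range ((t.headD []).length),
      (if gH t y x = 0 then
        (trailDFS ((t.map List.length).sum + 1) t x y (mkVis t)).1 else 0) := by
  unfold part1
  have hinner : ∀ (acc : Int) (y : Nat),
      (List.range ((t.headD []).length)).foldl (fun total x =>
        if gH t y x = 0 then
          total + (trailDFS ((t.map List.length).sum + 1) t x y (mkVis t)).1
        else total) acc =
      acc + ∑ x ∈ Finset.range ((t.headD []).length),
        (if gH t y x = 0 then
          (trailDFS ((t.map List.length).sum + 1) t x y (mkVis t)).1 else 0) := by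
    intro acc y
    rw [foldl_addlike _ _ (fun x => if gH t y x = 0 then
        (trailDFS ((t.map List.length).sum + 1) t x y (mkVis t)).1 else 0)
        (fun acc2 x => by by_cases hgx : gH t y x = 0 <;> simp [hgx]), map_range_sum]
  rw [foldl_addlike _ _ (fun y => ∑ x ∈ Finset.range ((t.headD []).length),
      (if gH t y x = 0 then
        (trailDFS ((t.map List.length).sum + 1) t x y (mkVis t)).1 else 0)) hinner,
    map_range_sum, zero_add]

theorem bColLoop_sum (t : List (List Int)) (y : Nat) (row : List Int) :
    ∀ (x : Nat) (total : Int),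
      bColLoop t y x row total =
        total + ∑ j ∈ Finset.range row.length,
          (if row.getD j 0 = 0 then bScore t y (x + j) else 0) := by
  induction row with
  | nil => intro x total; simp [bColLoop]
  | cons v vs ih =>
    intro x total
    rw [bColLoop, ih, List.length_cons, Finset.sum_range_succ']
    have h1 : ∀ j, ((v :: vs).getD (j+1) 0 = 0) = (vs.getD j 0 = 0) := by
      intro j; rw [List.getD_cons_succ]
    have h2 : (if v = 0 then total + bScore t y x else total) =
        total + (if (v :: vs).getD 0 0 = 0 then bScore t y (x + 0) else 0) := by
      rw [List.getD_cons_zero, Nat.add_zero]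
      split_ifs <;> ring
    rw [h2]
    have h3 : ∑ j ∈ Finset.range vs.length,
        (if vs.getD j 0 = 0 then bScore t y (x + 1 + j) else 0) =
        ∑ j ∈ Finset.range vs.length,
        (if (v :: vs).getD (j+1) 0 = 0 then bScore t y (x + (j+1)) else 0) := by
      apply Finset.sum_congr rfl
      intro j _
      rw [List.getD_cons_succ, show x + 1 + j = x + (j + 1) by omega]
    rw [h3]
    ring

theorem bRowLoop_sum (t : List (List Int)) (rs : List (List Int)) :
    ∀ (y : Nat) (total : Int),
      bRowLoop t y rs total =
        total + ∑ i ∈ Finset.range rs.length,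
          ∑ j ∈ Finset.range ((rs.getD i []).length),
            (if (rs.getD i []).getD j 0 = 0 then bScore t (y + i) j else 0) := by
  induction rs with
  | nil => intro y total; simp [bRowLoop]
  | cons r rest ih =>
    intro y total
    rw [bRowLoop, ih, bColLoop_sum, List.length_cons, Finset.sum_range_succ']
    have h3 : ∑ i ∈ Finset.range rest.length,
        ∑ j ∈ Finset.range ((rest.getD i []).length),
          (if (rest.getD i []).getD j 0 = 0 then bScore t (y + 1 + i) j else 0) =
        ∑ i ∈ Finset.range rest.length,
        ∑ j ∈ Finset.range (((r :: rest).getD (i+1) []).length),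
          (if ((r :: rest).getD (i+1) []).getD j 0 = 0 then bScore t (y + (i+1)) j else 0) := by
      apply Finset.sum_congr rfl
      intro i _
      rw [List.getD_cons_succ, show y + 1 + i = y + (i + 1) by omega]
    have h4 : ∑ j ∈ Finset.range (((r :: rest).getD 0 []).length),
        (if ((r :: rest).getD 0 []).getD j 0 = 0 then bScore t (y + 0) j else 0) =
        ∑ j ∈ Finset.range r.length, (if r.getD j 0 = 0 then bScore t y (0 + j) else 0) := by
      rw [List.getD_cons_zero, Nat.add_zero]
      exact Finset.sum_congr rfl (fun j _ => by rw [Nat.zero_add])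
    rw [h3, h4]
    ring

theorem part1_eq_alt {t : List (List Int)} (hPre : Pre_part1 t) : part1 t = part1_alt t := by
  rcases hPre with hPre | ⟨hge, hnz⟩
  case inr =>
    have hz1 : part1 t = 0 := by
      rw [part1_sum]
      apply Finset.sum_eq_zero
      intro y hy
      apply Finset.sum_eq_zero
      intro x hx
      rw [Finset.mem_range] at hy hx
      have hrow : t.getD y [] ∈ t := by
        rw [List.getD_eq_getElem _ _ hy]; exact List.getElem_mem hy
      have hxlt : x < (t.getD y []).length := lt_of_lt_of_le hx (hge _ hrow)
      have hne : gH t y x ≠ 0 := by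
        have he : gH t y x = (t.getD y [])[x] := by
          rw [gH, List.getD_eq_getElem _ _ hxlt]
        rw [he]
        exact hnz _ hrow _ (List.getElem_mem hxlt)
      rw [if_neg hne]
    have hz2 : part1_alt t = 0 := by
      rw [show part1_alt t = bRowLoop t 0 t 0 from rfl, bRowLoop_sum, zero_add]
      apply Finset.sum_eq_zero
      intro i hi
      apply Finset.sum_eq_zero
      intro j hj
      rw [Finset.mem_range] at hi hj
      have hrow : t.getD i [] ∈ t := by
        rw [List.getD_eq_getElem _ _ hi]; exact List.getElem_mem hi
      have hne : (t.getD i []).getD j 0 ≠ 0 := by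
        rw [List.getD_eq_getElem _ _ hj]
        exact hnz _ hrow _ (List.getElem_mem hj)
      rw [if_neg hne]
    rw [hz1, hz2]
  rw [part1_sum]
  rw [show part1_alt t = bRowLoop t 0 t 0 from rfl, bRowLoop_sum, zero_add]
  apply Finset.sum_congr rfl
  intro y hy
  rw [Finset.mem_range] at hy
  rw [rowlen_C hPre hy]
  apply Finset.sum_congr rfl
  intro x hx
  rw [Finset.mem_range, ← rowlen_C hPre hy] at hx
  have hg : gH t y x = (t.getD y []).getD x 0 := rfl
  rw [← hg, Nat.zero_add]
  split_ifs with h0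
  · exact score_eq hPre hy hx h0
  · rfl

-- ===== VERDICT (by name: the statement is the Claim_ definition above) =====
theorem part1_spec : Claim_equal_part1 := by
  intro t_map _ hPre
  show part1 t_map = part1_alt t_map
  exact part1_eq_alt hPre
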